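-- pv_equiv track=rewrite | github.com/FrK06/web-rag-original | app.py | format_table_response
-- ===== SOURCE A (Python) =====
-- from typing import List, Dict, Optional, Union
--
-- def format_table_response(text: str) -> str:
--     """Format pipe-delimited text as proper markdown tables."""
--     if '|' not in text:
--         return text
--
--     lines = text.split('\n')
--     formatted_lines = []
--     table_data = []
--     in_table = False
--
--     for line in lines:
--         # Check if line has multiple pipe characters and doesn't look like it's already in a markdown table
--         if line.count('|') > 2 and '---' not in line:
--             if not in_table:
--                 in_table = True
--                 table_data = []
--             table_data.append(line)
--         else:
--             # If we were processing a table and now hit non-table content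
--             if in_table:
--                 # Format the collected table
--                 formatted_table = _format_as_markdown_table(table_data)
--                 formatted_lines.append(formatted_table)
--                 in_table = False
--             formatted_lines.append(line)
--
--     # Handle case where text ends with table
--     if in_table:
--         formatted_table = _format_as_markdown_table(table_data)
--         formatted_lines.append(formatted_table)
--
--     return '\n'.join(formatted_lines)
--
-- def _format_as_markdown_table(table_lines: List[str]) -> str:
--     """Transform pipe-delimited lines into a properly formatted markdown table."""
--     if not table_lines:
--         return ""
--
--     # Clean up the lines
--     cleaned_lines = []
--     for line in table_lines:
--         # Strip leading/trailing pipes and whitespace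
--         line = line.strip()
--         if line.startswith('|'): line = line[1:]
--         if line.endswith('|'): line = line[:-1]
--
--         # Split by pipe and clean cells
--         cells = [cell.strip() for cell in line.split('|')]
--         cleaned_lines.append('| ' + ' | '.join(cells) + ' |')
--
--     # Build the table with header and separator row
--     table = [cleaned_lines[0]]
--
--     # Add separator row
--     header_cells = len(cleaned_lines[0].split('|')) - 1
--     separator = '|' + '|'.join(['---' for _ in range(header_cells)]) + '|'
--     table.append(separator)
--
--     # Add data rows
--     if len(cleaned_lines) > 1:
--         table.extend(cleaned_lines[1:])
--
--     return '\n'.join(table)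
-- ===== SOURCE B (Python) =====
-- from typing import List
--
-- def format_table_response(text: str) -> str:
--     """Format pipe-delimited text as proper markdown tables (streaming, line-local)."""
--     if '|' not in text:
--         return text
--     lines = text.split('\n')
--     is_table = [l.count('|') > 2 and '---' not in l for l in lines]
--     pieces = []
--     for line, t, prev in zip(lines, is_table, [False] + is_table):
--         if not t:
--             pieces.append(line)
--         else:
--             row = _clean_row(line)
--             pieces.append(row)
--             if not prev:
--                 pieces.append(_separator_for(row))
--     return '\n'.join(pieces)
--
-- def _clean_row(line: str) -> str:
--     line = line.strip()
--     if line.startswith('|'):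
--         line = line[1:]
--     if line.endswith('|'):
--         line = line[:-1]
--     return '| ' + ' | '.join(cell.strip() for cell in line.split('|')) + ' |'
--
-- def _separator_for(row: str) -> str:
--     return '|' + '|'.join('---' for _ in range(len(row.split('|')) - 1)) + '|'
-- ===== Notes on version B (the rewrite author's own statement) =====
-- stated objective: alternative
-- what changed: Replaced A's block-collecting state machine (in_table flag + table_data buffer + whole-block formatting helper) with a staged line-local rewrite: classify all lines first, then map each line to its output pieces, injecting the separator row after any table line whose predecessor is not a table line; table blocks are never materialized.
import Mathlib
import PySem

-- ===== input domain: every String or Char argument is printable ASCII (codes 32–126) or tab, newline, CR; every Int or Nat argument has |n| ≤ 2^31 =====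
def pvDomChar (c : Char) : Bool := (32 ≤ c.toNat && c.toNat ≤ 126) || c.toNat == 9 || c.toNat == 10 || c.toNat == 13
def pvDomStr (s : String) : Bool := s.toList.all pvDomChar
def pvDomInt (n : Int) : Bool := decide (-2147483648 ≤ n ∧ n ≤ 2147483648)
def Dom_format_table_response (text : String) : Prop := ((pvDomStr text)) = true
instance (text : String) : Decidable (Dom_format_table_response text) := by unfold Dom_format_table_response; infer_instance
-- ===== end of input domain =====

-- B replaces A's block-collecting state machine (buffer + whole-block formatting helper)
-- by a staged, line-local rewrite: classify every line first, then map each line to its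
-- output pieces, injecting the separator row after a table line whose predecessor is not
-- one; tables are never materialized as blocks (objective: alternative).

-- s.split(sep) for a nonempty literal sep (split? is some there; exact)
def pySplit (s sep : String) : List String := (PySem.Str.split? s sep).getD []

-- per-line cleaning, shared: the body of the helper's per-line loop in Source A, _clean_row in Source B
def cleanRow (line : String) : String :=
  let line := PySem.Str.strip line
  let line := if PySem.Str.startswith line "|" then PySem.Str.slice line (some 1) none else line
  let line := if PySem.Str.endswith line "|" then PySem.Str.slice line none (some (-1)) else line
  let cells := (pySplit line "|").map PySem.Str.strip
  "| " ++ PySem.Str.join " | " cells ++ " |"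

-- separator row computed from a cleaned row (A: from cleaned_lines[0]; B: _separator_for)
def sepFor (row : String) : String :=
  "|" ++ PySem.Str.join "|" ((PySem.List.pyRange 0 (((pySplit row "|").length : Int) - 1) 1).map (fun _ => "---")) ++ "|"

-- shared predicate: line.count('|') > 2 and '---' not in line
def keyFn (line : String) : Bool :=
  decide (2 < PySem.Str.count line "|") && !(PySem.Str.isIn "---" line)

-- ===== PORT A =====
-- A's helper _format_as_markdown_table
def fmtTable (table_lines : List String) : String :=
  if table_lines.isEmpty then ""
  else
    let cleaned := table_lines.map cleanRow
    let c0 := cleaned.headD ""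
    let separator := sepFor c0
    PySem.Str.join "\n" ([c0, separator] ++ cleaned.tail)

-- A's loop body: state = (formatted_lines, table_data, in_table)
def stepA (st : List String × List String × Bool) (line : String) :
    List String × List String × Bool :=
  let (fl, td, it) := st
  if keyFn line then
    (fl, (if it then td else []) ++ [line], true)
  else
    ((if it then fl ++ [fmtTable td] else fl) ++ [line], td, false)

def format_table_response (text : String) : String :=
  if !(PySem.Str.isIn "|" text) then text
  else
    let lines := pySplit text "\n"
    let st := lines.foldl stepA ([], [], false)
    let fl := if st.2.2 then st.1 ++ [fmtTable st.2.1] else st.1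
    PySem.Str.join "\n" fl

-- ===== PORT B =====
-- Source B: classify all lines, then zip each line with its flag and the previous flag and
-- emit its output pieces (the separator right after a table line whose predecessor is not one)
def format_table_response_alt (text : String) : String :=
  if !(PySem.Str.isIn "|" text) then text
  else
    let lines := pySplit text "\n"
    let is_table := lines.map keyFn
    let pieces := (lines.zip (is_table.zip (false :: is_table))).flatMap
      (fun x =>
        let l := x.1
        let t := x.2.1
        let prev := x.2.2
        if !t then [l]
        else
          let row := cleanRow l
          row :: (if !prev then [sepFor row] else []))
    PySem.Str.join "\n" pieces

-- ===== PRECONDITION & SPEC =====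
def Spec_format_table_response (text : String) (out : String) : Prop := out = format_table_response_alt text
instance (text : String) (out : String) : Decidable (Spec_format_table_response text out) := by unfold Spec_format_table_response; infer_instance

-- ===== CLAIM (what is proved, stated in full; the proofs are below) =====
def Claim_equal_format_table_response : Prop := ∀ (text : String), Dom_format_table_response text → Spec_format_table_response text (format_table_response text)

-- ===== LEMMAS AND PROOFS =====

-- proof helper: A's grouped output as a list of block strings (one entry per table block)
def grouped (ls : List String) : List String :=
  match ls with
  | [] => []
  | l :: rest =>
    if keyFn l then
      fmtTable (l :: rest.takeWhile keyFn) :: grouped (rest.dropWhile keyFn)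
    else
      l :: grouped rest
termination_by ls.length
decreasing_by
  · have := List.length_dropWhile_le keyFn rest; simp; omega
  · simp

-- proof helper: B's piece stream, written as a recursion carrying the previous flag
def goB (ls : List String) (prev : Bool) : List String :=
  match ls with
  | [] => []
  | l :: rest =>
    (if keyFn l then cleanRow l :: (if !prev then [sepFor (cleanRow l)] else []) else [l])
      ++ goB rest (keyFn l)

-- A's state machine, run from any state, produces the grouped block list
lemma loop_eq (ls : List String) (fl td : List String) (it : Bool) :
    (let st := ls.foldl stepA (fl, td, it)
     if st.2.2 then st.1 ++ [fmtTable st.2.1] else st.1) =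
    fl ++ (if it then
             fmtTable (td ++ ls.takeWhile keyFn) :: grouped (ls.dropWhile keyFn)
           else grouped ls) := by
  induction ls generalizing fl td it with
  | nil => cases it <;> simp [grouped]
  | cons l rest ih =>
    by_cases hk : keyFn l
    · cases it <;> simp [stepA, hk, ih, grouped, List.append_assoc]
    · cases it <;> simp [stepA, hk, ih, grouped, List.append_assoc]

-- B's zipped flatMap equals the recursive piece stream
lemma flatMap_eq_goB (ls : List String) (prev : Bool) :
    (ls.zip ((ls.map keyFn).zip (prev :: ls.map keyFn))).flatMap
      (fun x =>
        let l := x.1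
        let t := x.2.1
        let p := x.2.2
        if !t then [l]
        else
          let row := cleanRow l
          row :: (if !p then [sepFor row] else [])) = goB ls prev := by
  induction ls generalizing prev with
  | nil => simp [goB]
  | cons l rest ih =>
    simp only [List.map_cons, List.zip_cons_cons, List.flatMap_cons, ih, goB]
    by_cases hk : keyFn l <;> simp [hk]

-- join over a concatenation of two nonempty lists (Chars level)
lemma joinC_append (sep : List Char) (xs ys : List (List Char)) (hx : xs ≠ []) (hy : ys ≠ []) :
    PySem.Chars.join sep (xs ++ ys) =
      PySem.Chars.join sep xs ++ sep ++ PySem.Chars.join sep ys := by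
  induction xs with
  | nil => exact absurd rfl hx
  | cons x xs ih =>
    cases xs with
    | nil =>
      cases ys with
      | nil => exact absurd rfl hy
      | cons y ys => simp [PySem.Chars.join_cons_cons, PySem.Chars.join_singleton]
    | cons x' xs' =>
      have h := ih (by simp)
      simp only [List.cons_append, PySem.Chars.join_cons_cons] at h ⊢
      rw [h]
      simp [List.append_assoc]

lemma joinS_singleton (p : String) : PySem.Str.join "\n" [p] = p := by
  apply String.toList_inj.mp
  simp [PySem.Str.toList_join, PySem.Chars.join_singleton]

lemma joinS_append (xs ys : List String) (hx : xs ≠ []) (hy : ys ≠ []) :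
    PySem.Str.join "\n" (xs ++ ys) =
      PySem.Str.join "\n" xs ++ "\n" ++ PySem.Str.join "\n" ys := by
  apply String.toList_inj.mp
  simp only [PySem.Str.toList_join, String.toList_append, List.map_append]
  exact joinC_append _ _ _ (by simpa using hx) (by simpa using hy)

-- a joined block at the head of a join flattens
lemma joinS_flatten (ps rest : List String) (hp : ps ≠ []) :
    PySem.Str.join "\n" (PySem.Str.join "\n" ps :: rest) =
      PySem.Str.join "\n" (ps ++ rest) := by
  cases rest with
  | nil => simp [joinS_singleton]
  | cons r rs =>
    have h1 : PySem.Str.join "\n" ps :: r :: rs = [PySem.Str.join "\n" ps] ++ (r :: rs) := rfl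
    rw [h1, joinS_append _ _ (by simp) (by simp), joinS_singleton,
        joinS_append ps (r :: rs) hp (by simp)]

lemma fmtTable_eq (l : String) (tw : List String) :
    fmtTable (l :: tw) =
      PySem.Str.join "\n" (cleanRow l :: sepFor (cleanRow l) :: tw.map cleanRow) := by
  simp [fmtTable]

lemma grouped_ne_nil (ls : List String) (h : ls ≠ []) : grouped ls ≠ [] := by
  cases ls with
  | nil => exact absurd rfl h
  | cons l rest => rw [grouped]; by_cases hk : keyFn l <;> simp [hk]

lemma goB_ne_nil (ls : List String) (prev : Bool) (h : ls ≠ []) : goB ls prev ≠ [] := by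
  cases ls with
  | nil => exact absurd rfl h
  | cons l rest => rw [goB]; by_cases hk : keyFn l <;> simp [hk]

-- consuming a run of table lines: prev is true throughout, each emits just its cleaned row
lemma goB_all_key (tw dw : List String) (h : ∀ x ∈ tw, keyFn x = true) :
    goB (tw ++ dw) true = tw.map cleanRow ++ goB dw true := by
  induction tw with
  | nil => simp
  | cons t ts ih =>
    have ht : keyFn t = true := h t (by simp)
    simp only [List.cons_append, goB, ht, ih (fun x hx => h x (by simp [hx]))]
    simp

-- the incoming prev flag is irrelevant when the head is not a table line
lemma goB_head_not_key (ls : List String) (h : ∀ hh : ls ≠ [], keyFn (ls.head hh) = false) :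
    goB ls true = goB ls false := by
  cases ls with
  | nil => rfl
  | cons l rest =>
    have hk : keyFn l = false := h (by simp)
    simp [goB, hk]

-- the joined grouped block list equals the joined piece stream
lemma join_grouped_goB (ls : List String) :
    PySem.Str.join "\n" (grouped ls) = PySem.Str.join "\n" (goB ls false) := by
  induction ls using grouped.induct with
  | case1 => simp [grouped, goB]
  | case2 l rest hk ih =>
    have hsplit : rest = rest.takeWhile keyFn ++ rest.dropWhile keyFn :=
      (List.takeWhile_append_dropWhile).symm
    have hkey : ∀ x ∈ rest.takeWhile keyFn, keyFn x = true :=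
      fun x hx => List.mem_takeWhile_imp hx
    have hhead : ∀ hh : rest.dropWhile keyFn ≠ [], keyFn ((rest.dropWhile keyFn).head hh) = false :=
      fun hh => List.head_dropWhile_not keyFn hh
    rw [grouped, if_pos hk, fmtTable_eq, joinS_flatten _ _ (by simp)]
    have hB : goB (l :: rest) false =
        (cleanRow l :: sepFor (cleanRow l) :: (rest.takeWhile keyFn).map cleanRow)
          ++ goB (rest.dropWhile keyFn) false := by
      rw [goB, if_pos hk]
      conv_lhs => rw [hsplit]
      rw [hk]
      rw [goB_all_key _ _ hkey, goB_head_not_key _ hhead]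
      simp
    rw [hB]
    rcases hdw : rest.dropWhile keyFn with _ | ⟨d, ds⟩
    · simp [grouped, goB]
    · rw [hdw] at ih
      rw [joinS_append _ _ (by simp) (grouped_ne_nil _ (by simp)),
          joinS_append _ _ (by simp) (goB_ne_nil _ _ (by simp)), ih]
  | case3 l rest hk ih =>
    rw [grouped, if_neg hk]
    have hB : goB (l :: rest) false = [l] ++ goB rest false := by
      rw [goB, if_neg hk]
      simp [Bool.not_eq_true] at hk
      rw [hk]
    rw [hB]
    cases hr : rest with
    | nil => simp [grouped, goB]
    | cons r rs =>
      have h1 : l :: grouped (r :: rs) = [l] ++ grouped (r :: rs) := rfl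
      rw [h1, joinS_append _ _ (by simp) (grouped_ne_nil _ (by simp)),
          joinS_append _ _ (by simp) (goB_ne_nil _ _ (by simp)), ← hr, ih]

-- ===== VERDICT (by name: the statement is the Claim_ definition above) =====
theorem format_table_response_spec : Claim_equal_format_table_response := by
  intro text _
  unfold Spec_format_table_response format_table_response format_table_response_alt
  by_cases hg : PySem.Str.isIn "|" text
  · simp only [hg, Bool.not_true, Bool.false_eq_true, if_false]
    have hA := loop_eq (pySplit text "\n") [] [] false
    simp only at hA
    rw [hA]
    simp only [List.nil_append, if_neg (Bool.false_ne_true)]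
    rw [flatMap_eq_goB, join_grouped_goB]
  · have hf : PySem.Str.isIn "|" text = false := eq_false_of_ne_true hg
    simp only [hf, Bool.not_false, if_true]
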